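-- pv_equiv track=rewrite | github.com/MrBrantCode/unitest_baseline | mut_generate/mist_train_taco/taco_17675/solution.py | calculate_cumulative_frequency
-- ===== SOURCE A (Python) =====
-- def calculate_cumulative_frequency(arr, n=None):
--     if n is None:
--         n = len(arr)
--
--     if n == 0:
--         return []
--
--     arr.sort()
--     cumulative_freq = []
--     count = 1
--
--     for i in range(1, n):
--         if arr[i] != arr[i - 1]:
--             cumulative_freq.append(count)
--         count += 1
--
--     cumulative_freq.append(count)
--     return cumulative_freq
-- ===== SOURCE B (Python) =====
-- def calculate_cumulative_frequency(arr, n=None):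
--     arr.sort()
--     if n is None:
--         n = len(arr)
--     counts = {}
--     for x in arr[:n]:
--         counts[x] = counts.get(x, 0) + 1
--     result = []
--     total = 0
--     for c in counts.values():
--         total += c
--         result.append(total)
--     return result
-- ===== Notes on version B (the rewrite author's own statement) =====
-- stated objective: idiomatic
-- what changed: A's running-index boundary scan over adjacent sorted elements is replaced by a group-then-accumulate pass: count frequencies into an insertion-ordered dict over the sorted prefix and emit the running prefix sums of its values; the n==0 early return disappears because it falls out naturally.
-- outside the precondition, e.g. on calculate_cumulative_frequency([1, 1, 2], -1): A returns [1], B returns [2]; on calculate_cumulative_frequency([], 1): A returns [1], B returns []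
import Mathlib
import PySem

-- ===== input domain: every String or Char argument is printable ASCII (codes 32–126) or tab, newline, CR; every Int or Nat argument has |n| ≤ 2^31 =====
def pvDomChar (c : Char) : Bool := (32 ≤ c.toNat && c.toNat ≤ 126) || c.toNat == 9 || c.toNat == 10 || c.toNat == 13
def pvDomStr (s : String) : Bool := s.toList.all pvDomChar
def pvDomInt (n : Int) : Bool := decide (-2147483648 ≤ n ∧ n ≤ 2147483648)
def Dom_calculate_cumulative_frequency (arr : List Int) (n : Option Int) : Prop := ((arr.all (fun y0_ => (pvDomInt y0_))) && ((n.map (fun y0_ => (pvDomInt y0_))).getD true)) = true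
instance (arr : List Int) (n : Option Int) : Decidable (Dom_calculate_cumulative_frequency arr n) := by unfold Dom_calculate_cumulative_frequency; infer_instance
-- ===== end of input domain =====

-- B replaces A's running-index boundary scan by an idiomatic group-then-accumulate pass
-- (dict frequency count over the sorted prefix, then prefix sums of its values).
-- Both A and B sort arr in place in Python; the equivalence proved here is about the return value.

-- ===== PORT A =====
def calculate_cumulative_frequency (arr : List Int) (n : Option Int) : List Int :=
  let nn : Int := match n with | none => (arr.length : Int) | some k => k
  if nn = 0 then []
  else
    let s := PySem.List.sorted arr (fun x => x) false
    let st := (PySem.List.pyRange 1 nn 1).foldl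
      (fun (p : List Int × Int) i =>
        (if PySem.List.pyGetD s i 0 ≠ PySem.List.pyGetD s (i - 1) 0 then p.1 ++ [p.2] else p.1,
         p.2 + 1))
      ([], 1)
    st.1 ++ [st.2]

-- ===== PORT B =====
def calculate_cumulative_frequency_alt (arr : List Int) (n : Option Int) : List Int :=
  let s := PySem.List.sorted arr (fun x => x) false
  let nn : Int := match n with | none => (s.length : Int) | some k => k
  let counts := (PySem.List.slice s none (some nn)).foldl
    (fun (d : PySem.Dict Int Int) x => d.modify x 0 (· + 1)) PySem.Dict.empty
  let st := counts.values.foldl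
    (fun (p : List Int × Int) c => (p.1 ++ [p.2 + c], p.2 + c)) ([], 0)
  st.1

-- ===== PRECONDITION & SPEC =====
-- Pre_ excludes n = some k with k < 0 or k > len(arr): these are outside the natural domain of a
-- count of elements — there A raises IndexError (k > len, unless the loop body never runs, where it
-- returns an accidental singleton) or returns a constant singleton regardless of arr (k < 0), an
-- artefact of its loop bound; concrete excluded examples are in the claim's cites.
def Pre_calculate_cumulative_frequency (arr : List Int) (n : Option Int) : Prop :=
  ∀ k ∈ n, 0 ≤ k ∧ k ≤ (arr.length : Int)
instance (arr : List Int) (n : Option Int) : Decidable (Pre_calculate_cumulative_frequency arr n) := by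
  unfold Pre_calculate_cumulative_frequency; infer_instance

def pvWitness_calculate_cumulative_frequency : List Int × Option Int := ([3, 1, 3, 2], some 3)

def Spec_calculate_cumulative_frequency (arr : List Int) (n : Option Int) (out : List Int) : Prop := out = calculate_cumulative_frequency_alt arr n
instance (arr : List Int) (n : Option Int) (out : List Int) : Decidable (Spec_calculate_cumulative_frequency arr n out) := by unfold Spec_calculate_cumulative_frequency; infer_instance

-- ===== CLAIM (what is proved, stated in full; the proofs are below) =====
def Claim_equal_calculate_cumulative_frequency : Prop := ∀ (arr : List Int) (n : Option Int), Dom_calculate_cumulative_frequency arr n → Pre_calculate_cumulative_frequency arr n → Spec_calculate_cumulative_frequency arr n (calculate_cumulative_frequency arr n)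

-- ===== LEMMAS AND PROOFS =====

-- run lengths of maximal blocks of equal adjacent elements (groupby sizes), as Ints
def runLengths : List Int → List Int
  | [] => []
  | x :: rest =>
      (((rest.takeWhile (· == x)).length : Int) + 1) :: runLengths (rest.dropWhile (· == x))
  termination_by t => t.length
  decreasing_by
    exact Nat.lt_succ_of_le (List.length_dropWhile_le _ _)

-- prefix sums starting from c
def partialSums (c : Int) : List Int → List Int
  | [] => []
  | v :: vs => (c + v) :: partialSums (c + v) vs

-- boundary indices: positions (counted from i, for the tail starting there) where adjacent elements differ
def bAux : List Int → Int → List Int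
  | p :: q :: rest, i => (if q ≠ p then [i] else []) ++ bAux (q :: rest) (i + 1)
  | _, _ => []

theorem foldB_spec (vs : List Int) : ∀ (acc : List Int) (c : Int),
    (vs.foldl (fun (p : List Int × Int) v => (p.1 ++ [p.2 + v], p.2 + v)) (acc, c)).1
      = acc ++ partialSums c vs := by
  induction vs with
  | nil => intro acc c; simp only [List.foldl_nil, partialSums, List.append_nil]
  | cons v vs ih =>
      intro acc c
      simp only [List.foldl_cons, partialSums]
      rw [ih]
      simp

theorem foldA_spec (s : List Int) : ∀ (k : Nat) (c : Int) (acc : List Int),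
    ((PySem.List.pyRange c (c + (k : Int)) 1).foldl
      (fun (p : List Int × Int) i =>
        (if PySem.List.pyGetD s i 0 ≠ PySem.List.pyGetD s (i - 1) 0 then p.1 ++ [p.2] else p.1,
         p.2 + 1)) (acc, c))
      = (acc ++ ((PySem.List.pyRange c (c + (k : Int)) 1).filter
          (fun i => decide (PySem.List.pyGetD s i 0 ≠ PySem.List.pyGetD s (i - 1) 0))), c + (k : Int)) := by
  intro k
  induction k with
  | zero => intro c acc; simp [PySem.List.pyRange_one_eq_nil]
  | succ k ih =>
      intro c acc
      have hlt : c < c + ((k : Int) + 1) := by omega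
      rw [show (((k : Nat) + 1 : Nat) : Int) = (k : Int) + 1 by push_cast; ring]
      rw [PySem.List.pyRange_one_cons hlt]
      rw [show c + ((k : Int) + 1) = (c + 1) + (k : Int) by ring]
      simp only [List.foldl_cons, List.filter_cons]
      by_cases hc : PySem.List.pyGetD s c 0 = PySem.List.pyGetD s (c - 1) 0
      · have h := ih (c + 1) acc
        simp [hc] at h ⊢
        exact h
      · have h := ih (c + 1) (acc ++ [c])
        simp [hc] at h ⊢
        exact h

theorem filter_eq_bAux (t : List Int) : ∀ (d k : Nat), t.length = k + d + 1 →
    ((PySem.List.pyRange ((k : Int) + 1) (t.length : Int) 1).filter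
        (fun i => decide (PySem.List.pyGetD t i 0 ≠ PySem.List.pyGetD t (i - 1) 0)))
      = bAux (t.drop k) ((k : Int) + 1) := by
  intro d
  induction d with
  | zero =>
      intro k hk
      rw [PySem.List.pyRange_one_eq_nil (by omega)]
      have h1 : t.drop k = [t[k]'(by omega)] := by
        have h2 := List.drop_eq_getElem_cons (l := t) (i := k) (by omega)
        rw [h2, List.drop_eq_nil_of_le (by omega)]
      rw [h1]; rfl
  | succ d ih =>
      intro k hk
      have hk1 : k < t.length := by omega
      have hk2 : k + 1 < t.length := by omega
      rw [PySem.List.pyRange_one_cons (by omega)]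
      rw [List.filter_cons]
      have hgk : PySem.List.pyGetD t ((k : Int) + 1) 0 = t[k + 1] := by
        rw [show (k : Int) + 1 = ((k + 1 : Nat) : Int) by push_cast; ring,
            PySem.List.pyGetD_natCast]
        simp [List.getD_eq_getElem?_getD, List.getElem?_eq_getElem hk2]
      have hgk' : PySem.List.pyGetD t ((k : Int) + 1 - 1) 0 = t[k] := by
        rw [show (k : Int) + 1 - 1 = ((k : Nat) : Int) by ring, PySem.List.pyGetD_natCast]
        simp [List.getD_eq_getElem?_getD, List.getElem?_eq_getElem hk1]
      have hdrop : t.drop k = t[k] :: t.drop (k + 1) := List.drop_eq_getElem_cons hk1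
      have hdrop2 : t.drop (k + 1) = t[k + 1] :: t.drop (k + 2) := List.drop_eq_getElem_cons hk2
      have hrec := ih (k + 1) (by omega)
      rw [show ((k + 1 : Nat) : Int) + 1 = (k : Int) + 1 + 1 by push_cast; ring] at hrec
      rw [hdrop, hdrop2]
      rw [hdrop2] at hrec
      show _ = (if t[k+1] ≠ t[k] then [(k : Int) + 1] else []) ++ bAux (t[k+1] :: t.drop (k+2)) ((k : Int) + 1 + 1)
      rw [← hrec, hgk, hgk']
      by_cases hne : t[k + 1] ≠ t[k]
      · simp [hne]
      · simp [hne]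

theorem bAux_eq_partialSums : ∀ (t : List Int), t ≠ [] → ∀ (c : Int),
    bAux t (c + 1) ++ [c + (t.length : Int)] = partialSums c (runLengths t) := by
  intro t
  induction t with
  | nil => intro h; exact absurd rfl h
  | cons x rest ih =>
      intro _ c
      cases rest with
      | nil =>
          simp only [runLengths, List.takeWhile_nil, List.dropWhile_nil, List.length_nil,
            partialSums, bAux]
          simp [partialSums, runLengths]
      | cons y rest' =>
          by_cases hyx : y = x
          · subst hyx
            have h2 := ih (by simp) (c + 1)
            have hb : bAux (y :: y :: rest') (c + 1) = bAux (y :: rest') (c + 1 + 1) := by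
              simp [bAux]
            have e1 : c + ((y :: y :: rest').length : Int)
                = c + 1 + ((y :: rest').length : Int) := by
              push_cast [List.length_cons]; ring
            rw [hb, e1, h2]
            simp only [runLengths, List.takeWhile_cons, List.dropWhile_cons, beq_self_eq_true,
              if_true, List.length_cons, partialSums]
            congr 1
            all_goals first
              | (push_cast; ring)
              | (congr 1 <;> (push_cast; ring))
          · have h2 := ih (by simp) (c + 1)
            have hb : bAux (x :: y :: rest') (c + 1) = (c + 1) :: bAux (y :: rest') (c + 1 + 1) := by
              simp [bAux, hyx]
            have e1 : c + ((x :: y :: rest').length : Int)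
                = c + 1 + ((y :: rest').length : Int) := by
              push_cast [List.length_cons]; ring
            have htw : (y :: rest').takeWhile (· == x) = [] := by
              simp [List.takeWhile_cons, hyx]
            have hdw : (y :: rest').dropWhile (· == x) = y :: rest' := by
              simp [List.dropWhile_cons, hyx]
            rw [hb, e1, List.cons_append, h2]
            simp only [runLengths, htw, hdw, List.length_nil, partialSums]
            congr 1
            all_goals first
              | (push_cast; ring)
              | (congr 1 <;> (push_cast; ring))

theorem discard_filter (s : List Int) (x : Int) :
    PySem.Set.discard s x = s.filter (fun y => !(y == x)) := rfl

theorem discard_notmem {s : List Int} {x : Int} (h : x ∉ s) : PySem.Set.discard s x = s := by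
  rw [discard_filter]
  apply List.filter_eq_self.mpr
  intro a ha
  have : a ≠ x := fun he => h (he ▸ ha)
  simp [this]

theorem ofList_run_append (rest2 : List Int) (x : Int) : ∀ (run : List Int), (∀ a ∈ run, a = x) →
    PySem.Set.ofList (x :: (run ++ rest2)) = x :: PySem.Set.discard (PySem.Set.ofList rest2) x := by
  intro run
  induction run with
  | nil => intro _; simp [PySem.Set.ofList_cons]
  | cons a run' ih =>
      intro h
      have hax : a = x := h a (by simp)
      subst hax
      have h' : ∀ b ∈ run', b = a := fun b hb => h b (by simp [hb])
      rw [List.cons_append, PySem.Set.ofList_cons, ih h', discard_filter, discard_filter,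
          List.filter_cons]
      simp [List.filter_filter]

theorem sorted_not_mem_dropWhile {x : Int} {rest : List Int}
    (hs : (x :: rest).Pairwise (· ≤ ·)) : x ∉ rest.dropWhile (· == x) := by
  have hsub : (rest.dropWhile (· == x)).Sublist rest := List.dropWhile_sublist _
  cases hd : rest.dropWhile (· == x) with
  | nil => simp
  | cons y d' =>
      have hy : ¬ (y == x) = true := by
        have hw : rest.dropWhile (· == x) ≠ [] := by rw [hd]; simp
        have hhead := List.head_dropWhile_not (p := (· == x)) (l := rest) hw
        simp only [hd, List.head_cons] at hhead
        simp [hhead]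
      have hyx : y ≠ x := by simpa using hy
      have hmem : ∀ z ∈ y :: d', z ∈ rest := fun z hz => (hd ▸ hsub).subset hz
      have hxle : ∀ z ∈ rest, x ≤ z := by
        rw [List.pairwise_cons] at hs; exact hs.1
      have hpw : (y :: d').Pairwise (· ≤ ·) := by
        have hrest : rest.Pairwise (· ≤ ·) := (List.pairwise_cons.mp hs).2
        exact List.Pairwise.sublist (hd ▸ hsub) hrest
      intro hx
      rcases List.mem_cons.mp hx with h | h
      · exact hyx h.symm
      · have h1 : y ≤ x := (List.pairwise_cons.mp hpw).1 x h
        have h2 : x ≤ y := hxle y (hmem y (by simp))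
        exact hyx (le_antisymm h1 h2)

theorem counts_eq_runLengths : ∀ (t : List Int), t.Pairwise (· ≤ ·) →
    (PySem.Set.ofList t).map (fun k => (t.count k : Int)) = runLengths t := by
  intro t
  induction t using runLengths.induct with
  | case1 => simp [runLengths]
  | case2 x rest ih =>
      intro hs
      set run := rest.takeWhile (· == x) with hrun
      set rest2 := rest.dropWhile (· == x) with hrest2
      have hsplit : rest = run ++ rest2 := (List.takeWhile_append_dropWhile).symm
      have hrun_all : ∀ a ∈ run, a = x := by
        intro a ha
        have := List.mem_takeWhile_imp (l := rest) (p := (· == x)) (hrun ▸ ha)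
        simpa using this
      have hx2 : x ∉ rest2 := sorted_not_mem_dropWhile hs
      have hofl : PySem.Set.ofList (x :: rest) = x :: PySem.Set.ofList rest2 := by
        rw [show x :: rest = x :: (run ++ rest2) by rw [← hsplit],
            ofList_run_append rest2 x run hrun_all, discard_notmem]
        intro hmem
        exact hx2 ((PySem.Set.mem_ofList _ _).mp hmem)
      have hs2 : rest2.Pairwise (· ≤ ·) := by
        have hrest : rest.Pairwise (· ≤ ·) := (List.pairwise_cons.mp hs).2
        exact List.Pairwise.sublist (List.dropWhile_sublist _) hrest
      rw [hofl, List.map_cons]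
      simp only [runLengths]
      congr 1
      · -- head: count of x in x :: rest is run.length + 1
        have hcx : (x :: rest).count x = run.length + 1 := by
          rw [show x :: rest = x :: (run ++ rest2) by rw [← hsplit]]
          rw [List.count_cons_self, List.count_append]
          have h1 : run.count x = run.length := by
            rw [List.count_eq_length]
            intro b hb; exact (hrun_all b hb).symm
          have h2 : rest2.count x = 0 := List.count_eq_zero.mpr hx2
          omega
        rw [hcx]; push_cast; ring
      · -- tail: counts of other keys agree with counts in rest2
        rw [← ih hs2]
        apply List.map_congr_left
        intro k hk
        have hk2 : k ∈ rest2 := (PySem.Set.mem_ofList _ _).mp hk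
        have hkx : k ≠ x := fun he => hx2 (he ▸ hk2)
        congr 1
        rw [show x :: rest = x :: (run ++ rest2) by rw [← hsplit]]
        have hrun0 : run.count k = 0 := by
          rw [List.count_eq_zero]
          intro hkr
          exact hkx (hrun_all k hkr)
        simp [List.count_cons, List.count_append, hrun0]
        exact fun h => hkx h.symm

theorem take_pairwise_le {s : List Int} (h : s.Pairwise (· ≤ ·)) (k : Nat) :
    (s.take k).Pairwise (· ≤ ·) := List.Pairwise.sublist (List.take_sublist k s) h

theorem main_eq (s : List Int) (hsorted : s.Pairwise (· ≤ ·)) (m : Int)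
    (h0 : 0 ≤ m) (hm : m ≤ (s.length : Int)) :
    (if m = 0 then ([] : List Int)
     else
       let st := (PySem.List.pyRange 1 m 1).foldl
         (fun (p : List Int × Int) i =>
           (if PySem.List.pyGetD s i 0 ≠ PySem.List.pyGetD s (i - 1) 0 then p.1 ++ [p.2] else p.1,
            p.2 + 1))
         ([], 1)
       st.1 ++ [st.2])
    = (((PySem.List.slice s none (some m)).foldl
          (fun (d : PySem.Dict Int Int) x => d.modify x 0 (· + 1)) PySem.Dict.empty).values.foldl
        (fun (p : List Int × Int) c => (p.1 ++ [p.2 + c], p.2 + c)) ([], 0)).1 := by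
  have hslice : PySem.List.slice s none (some m) = s.take m.toNat := PySem.List.slice_to s h0
  set t := s.take m.toNat with ht
  have htlen : t.length = m.toNat := by
    rw [ht, List.length_take]; omega
  have htsorted : t.Pairwise (· ≤ ·) := take_pairwise_le hsorted _
  -- B side characterization
  have hB : (((PySem.List.slice s none (some m)).foldl
          (fun (d : PySem.Dict Int Int) x => d.modify x 0 (· + 1)) PySem.Dict.empty).values.foldl
        (fun (p : List Int × Int) c => (p.1 ++ [p.2 + c], p.2 + c)) ([], 0)).1
      = partialSums 0 (runLengths t) := by
    rw [hslice]
    have hcounter : t.foldl (fun (d : PySem.Dict Int Int) x => d.modify x 0 (· + 1)) PySem.Dict.empty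
        = PySem.Dict.counter t := rfl
    rw [hcounter]
    have hvals : (PySem.Dict.counter t).values
        = (PySem.Set.ofList t).map (fun k => (t.count k : Int)) := by
      show ((PySem.Dict.counter t).items).map (·.2) = _
      rw [PySem.Dict.items_counter]
      simp [List.map_map, Function.comp]
    rw [hvals, counts_eq_runLengths t htsorted, foldB_spec, List.nil_append]
  rw [hB]
  by_cases hm0 : m = 0
  · subst hm0
    have : t = [] := by
      rw [ht]; simp
    rw [if_pos rfl, this]
    simp [runLengths, partialSums]
  · rw [if_neg hm0]
    have hm1 : 1 ≤ m := by omega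
    -- A side: fold to filter
    have hk : m = 1 + ((m - 1).toNat : Int) := by omega
    have hfoldA := foldA_spec s (m - 1).toNat 1 []
    rw [← hk] at hfoldA
    show ((PySem.List.pyRange 1 m 1).foldl _ ([], 1)).1
        ++ [((PySem.List.pyRange 1 m 1).foldl _ ([], 1)).2] = _
    rw [hfoldA]
    simp only [List.nil_append]
    -- replace lookups in s by lookups in t
    have hfc : (PySem.List.pyRange 1 m 1).filter
          (fun i => decide (PySem.List.pyGetD s i 0 ≠ PySem.List.pyGetD s (i - 1) 0))
        = (PySem.List.pyRange 1 m 1).filter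
          (fun i => decide (PySem.List.pyGetD t i 0 ≠ PySem.List.pyGetD t (i - 1) 0)) := by
      apply List.filter_congr
      intro i hi
      have hi' := (PySem.List.mem_pyRange_one).mp hi
      have hget : ∀ (j : Int), 0 ≤ j → j < m → PySem.List.pyGetD s j 0 = PySem.List.pyGetD t j 0 := by
        intro j hj0 hjm
        have hjt : j < (t.length : Int) := by omega
        have hjs : j < (s.length : Int) := by omega
        rw [PySem.List.pyGetD_eq_getElem s (i := j) 0 hj0 (by exact_mod_cast hjs),
            PySem.List.pyGetD_eq_getElem t (i := j) 0 hj0 (by exact_mod_cast hjt)]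
        simp only [ht, List.getElem_take]
      rw [hget i (by omega) (by omega), hget (i - 1) (by omega) (by omega)]
    rw [hfc]
    -- filter to bAux on t
    have htne : t ≠ [] := by
      intro h
      rw [h] at htlen; simp at htlen; omega
    have hd : t.length = 0 + (t.length - 1) + 1 := by
      have : 1 ≤ t.length := List.length_pos_iff.mpr htne
      omega
    have hfilter := filter_eq_bAux t (t.length - 1) 0 hd
    simp only [Nat.cast_zero, zero_add, List.drop_zero] at hfilter
    have hmlen : (t.length : Int) = m := by rw [htlen]; omega
    rw [← hmlen, hfilter]
    have := bAux_eq_partialSums t htne 0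
    simpa using this

-- ===== VERDICT (by name: the statement is the Claim_ definition above) =====
theorem calculate_cumulative_frequency_spec : Claim_equal_calculate_cumulative_frequency := by
  intro arr n _ hpre
  unfold Spec_calculate_cumulative_frequency
  unfold calculate_cumulative_frequency calculate_cumulative_frequency_alt
  have hlen : (PySem.List.sorted arr (fun x => x) false).length = arr.length :=
    PySem.List.length_sorted ..
  have hsorted : (PySem.List.sorted arr (fun x => x) false).Pairwise (· ≤ ·) :=
    PySem.List.sorted_pairwise ..
  cases n with
  | none =>
      simp only []
      rw [show (arr.length : Int) = ((PySem.List.sorted arr (fun x => x) false).length : Int) by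
        rw [hlen]]
      exact main_eq _ hsorted _ (Int.natCast_nonneg _) le_rfl
  | some k =>
      unfold Pre_calculate_cumulative_frequency at hpre
      have h := hpre k rfl
      exact main_eq _ hsorted k h.1 (by rw [hlen]; exact h.2)
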